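-- pv_equiv track=rewrite | github.com/HyosungSink/OSKernel2026-T202610486999572 | tools/run_full_local_suite.py | parse_refresh_ltp_shard_weight_variants
-- ===== SOURCE A (Python) =====
-- LTP_RUNTIME_WEIGHT_SAMPLE_BY_VARIANT = {
--     "glibc-rv": "ltp-glibc-rv",
--     "musl-rv": "ltp-musl-rv",
--     "glibc-la": "ltp-glibc-la",
--     "musl-la": "ltp-musl-la",
-- }
--
-- def fail(message: str) -> None:
--     raise ValueError(message)
--
-- def parse_refresh_ltp_shard_weight_variants(chunks: list[str] | None) -> list[str]:
--     if not chunks: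
--         return []
--     allowed = set(LTP_RUNTIME_WEIGHT_SAMPLE_BY_VARIANT)
--     variants: list[str] = []
--     seen: set[str] = set()
--     invalid: list[str] = []
--     for chunk in chunks:
--         for part in chunk.split(","):
--             variant = part.strip()
--             if not variant:
--                 continue
--             if variant not in allowed:
--                 invalid.append(variant)
--                 continue
--             if variant not in seen:
--                 variants.append(variant)
--                 seen.add(variant)
--     if invalid:
--         fail(
--             "unknown LTP shard weight variants: "
--             + ", ".join(invalid)
--             + " (expected one of: "
--             + ", ".join(sorted(allowed))
--             + ")"
--         )
--     return variants
-- ===== SOURCE B (Python) =====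
-- LTP_RUNTIME_WEIGHT_SAMPLE_BY_VARIANT = {
--     "glibc-rv": "ltp-glibc-rv",
--     "musl-rv": "ltp-musl-rv",
--     "glibc-la": "ltp-glibc-la",
--     "musl-la": "ltp-musl-la",
-- }
--
-- def fail(message: str) -> None:
--     raise ValueError(message)
--
-- def parse_refresh_ltp_shard_weight_variants(chunks: list[str] | None) -> list[str]:
--     if not chunks:
--         return []
--     flat = [v for chunk in chunks for v in (p.strip() for p in chunk.split(",")) if v]
--     invalid = [v for v in flat if v not in LTP_RUNTIME_WEIGHT_SAMPLE_BY_VARIANT]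
--     if invalid:
--         fail(
--             "unknown LTP shard weight variants: "
--             + ", ".join(invalid)
--             + " (expected one of: "
--             + ", ".join(sorted(LTP_RUNTIME_WEIGHT_SAMPLE_BY_VARIANT))
--             + ")"
--         )
--     return list(dict.fromkeys(flat))
-- ===== Notes on version B (the rewrite author's own statement) =====
-- stated objective: idiomatic
-- what changed: Replaces A's single interleaved nested loop with manual seen-set dedup and invalid accumulation by three staged passes: flatten all stripped non-empty parts, filter that flat list for invalid names (failing if any), then dedup with dict.fromkeys.
import Mathlib
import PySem

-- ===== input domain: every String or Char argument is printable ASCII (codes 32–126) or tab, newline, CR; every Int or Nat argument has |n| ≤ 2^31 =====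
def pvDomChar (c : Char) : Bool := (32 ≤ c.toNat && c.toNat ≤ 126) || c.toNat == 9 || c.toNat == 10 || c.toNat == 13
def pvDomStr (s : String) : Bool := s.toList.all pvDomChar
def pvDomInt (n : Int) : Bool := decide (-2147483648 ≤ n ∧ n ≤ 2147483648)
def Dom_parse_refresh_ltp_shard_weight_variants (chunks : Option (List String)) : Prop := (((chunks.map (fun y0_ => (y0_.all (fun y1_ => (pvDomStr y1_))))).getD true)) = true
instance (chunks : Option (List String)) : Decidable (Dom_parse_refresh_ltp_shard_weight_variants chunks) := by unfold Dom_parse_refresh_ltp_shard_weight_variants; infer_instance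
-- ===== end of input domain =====

-- B replaces A's interleaved loop (manual seen-set dedup + invalid accumulation) by three
-- staged passes: flatten, filter invalid, dedup via dict.fromkeys; idiomatic, same cost.

-- s.split(",") — exact: the separator "," is nonempty, so split? is always `some`
def pvSplitComma (s : String) : List String := (PySem.Str.split? s ",").getD []

-- keys of LTP_RUNTIME_WEIGHT_SAMPLE_BY_VARIANT, in insertion order
def pvAllowed : List String := ["glibc-rv", "musl-rv", "glibc-la", "musl-la"]

-- ===== PORT A =====
-- the body of A's inner loop, on state (variants, seen, invalid);
-- `PySem.Set.ofList pvAllowed` is A's `allowed = set(LTP_RUNTIME_WEIGHT_SAMPLE_BY_VARIANT)`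
def pvStepA (st : List String × PySem.Set String × List String) (part : String) :
    List String × PySem.Set String × List String :=
  let variant := PySem.Str.strip part
  if variant = "" then st
  else if ¬ (PySem.Set.contains (PySem.Set.ofList pvAllowed) variant = true) then
    (st.1, st.2.1, st.2.2 ++ [variant])
  else if PySem.Set.contains st.2.1 variant = true then st
  else (st.1 ++ [variant], PySem.Set.add st.2.1 variant, st.2.2)

def parse_refresh_ltp_shard_weight_variants (chunks : Option (List String)) : List String :=
  match chunks with
  | none => []
  | some cs =>
    if cs = [] then []
    else
      let st :=
        cs.foldl (fun st chunk => (pvSplitComma chunk).foldl pvStepA st)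
          (([] : List String), (PySem.Set.empty : PySem.Set String), ([] : List String))
      -- 'if invalid: fail(...)' raises ValueError; those inputs are outside Pre_
      if st.2.2 ≠ [] then [] else st.1

-- ===== PORT B =====
def parse_refresh_ltp_shard_weight_variants_alt (chunks : Option (List String)) : List String :=
  match chunks with
  | none => []
  | some cs =>
    if cs = [] then []
    else
      let flat := cs.flatMap (fun chunk =>
        ((pvSplitComma chunk).map PySem.Str.strip).filter (fun v => v ≠ ""))
      -- 'v not in LTP_RUNTIME_WEIGHT_SAMPLE_BY_VARIANT' = key membership
      let invalid := flat.filter (fun v => ¬ (v ∈ pvAllowed))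
      -- 'if invalid: fail(...)' raises ValueError; those inputs are outside Pre_
      if invalid ≠ [] then [] else PySem.List.dedup flat

-- ===== PRECONDITION & SPEC =====
-- Pre_ excludes exactly the inputs on which A raises ValueError (some stripped non-empty
-- comma-separated part is not an allowed variant name); B raises the identical ValueError there.
def Pre_parse_refresh_ltp_shard_weight_variants (chunks : Option (List String)) : Prop :=
  ∀ c ∈ chunks.getD [], ∀ p ∈ pvSplitComma c,
      PySem.Str.strip p = "" ∨ PySem.Str.strip p ∈ pvAllowed

instance (chunks : Option (List String)) : Decidable (Pre_parse_refresh_ltp_shard_weight_variants chunks) := by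
  unfold Pre_parse_refresh_ltp_shard_weight_variants; infer_instance

def pvWitness_parse_refresh_ltp_shard_weight_variants : Option (List String) :=
  some ["glibc-rv, musl-la", " musl-la ,", "glibc-rv"]

def Spec_parse_refresh_ltp_shard_weight_variants (chunks : Option (List String)) (out : List String) : Prop := out = parse_refresh_ltp_shard_weight_variants_alt chunks
instance (chunks : Option (List String)) (out : List String) : Decidable (Spec_parse_refresh_ltp_shard_weight_variants chunks out) := by unfold Spec_parse_refresh_ltp_shard_weight_variants; infer_instance

-- ===== CLAIM (what is proved, stated in full; the proofs are below) =====
def Claim_equal_parse_refresh_ltp_shard_weight_variants : Prop := ∀ (chunks : Option (List String)), Dom_parse_refresh_ltp_shard_weight_variants chunks → Pre_parse_refresh_ltp_shard_weight_variants chunks → Spec_parse_refresh_ltp_shard_weight_variants chunks (parse_refresh_ltp_shard_weight_variants chunks)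

-- ===== LEMMAS AND PROOFS =====

-- a valid, non-empty variant takes A's dedup branch, which is exactly PySem.Set.add on both accumulators
theorem pv_step_valid (v : PySem.Set String) (p : String)
    (hx : PySem.Str.strip p ∈ pvAllowed) (hne : ¬ PySem.Str.strip p = "") :
    pvStepA (v, v, []) p
    = (PySem.Set.add v (PySem.Str.strip p), PySem.Set.add v (PySem.Str.strip p), ([] : List String)) := by
  simp only [pvStepA]
  rw [if_neg hne, if_neg (by simpa using hx)]
  by_cases hm : PySem.Str.strip p ∈ v <;> simp [PySem.Set.add, PySem.Set.contains, hm]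

-- A's inner loop over one chunk's parts = Set.update by the stripped non-empty parts
theorem pv_inner (ps : List String) (v : PySem.Set String)
    (h : ∀ p ∈ ps, PySem.Str.strip p = "" ∨ PySem.Str.strip p ∈ pvAllowed) :
    ps.foldl pvStepA (v, v, ([] : List String))
    = (PySem.Set.update v ((ps.map PySem.Str.strip).filter (fun x => x ≠ "")),
       PySem.Set.update v ((ps.map PySem.Str.strip).filter (fun x => x ≠ "")),
       ([] : List String)) := by
  induction ps generalizing v with
  | nil => simp [PySem.Set.update]
  | cons p ps ih =>
    simp only [List.foldl_cons, List.map_cons, List.filter_cons]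
    by_cases hs : PySem.Str.strip p = ""
    · rw [show pvStepA (v, v, []) p = (v, v, ([] : List String)) by simp [pvStepA, hs]]
      rw [if_neg (by simp [hs])]
      exact ih v (fun q hq => h q (List.mem_cons_of_mem _ hq))
    · have hx : PySem.Str.strip p ∈ pvAllowed := (h p (List.mem_cons_self ..)).resolve_left hs
      rw [pv_step_valid v p hx hs, if_pos (by simp [hs]),
        ih _ (fun q hq => h q (List.mem_cons_of_mem _ hq))]
      simp [PySem.Set.update]

-- A's outer loop = Set.update by B's flattened list of stripped non-empty parts
theorem pv_outer (cs : List String) (v : PySem.Set String)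
    (h : ∀ c ∈ cs, ∀ p ∈ pvSplitComma c, PySem.Str.strip p = "" ∨ PySem.Str.strip p ∈ pvAllowed) :
    cs.foldl (fun st chunk => (pvSplitComma chunk).foldl pvStepA st) (v, v, ([] : List String))
    = (PySem.Set.update v (cs.flatMap (fun c => ((pvSplitComma c).map PySem.Str.strip).filter (fun x => x ≠ ""))),
       PySem.Set.update v (cs.flatMap (fun c => ((pvSplitComma c).map PySem.Str.strip).filter (fun x => x ≠ ""))),
       ([] : List String)) := by
  induction cs generalizing v with
  | nil => simp [PySem.Set.update]
  | cons c cs ih =>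
    simp only [List.foldl_cons, List.flatMap_cons]
    rw [pv_inner _ _ (h c (List.mem_cons_self ..)),
      ih _ (fun c' hc' => h c' (List.mem_cons_of_mem _ hc'))]
    simp [PySem.Set.update, List.foldl_append]

-- ===== VERDICT (by name: the statement is the Claim_ definition above) =====
theorem parse_refresh_ltp_shard_weight_variants_spec : Claim_equal_parse_refresh_ltp_shard_weight_variants := by
  intro chunks _ hpre
  unfold Spec_parse_refresh_ltp_shard_weight_variants
  cases chunks with
  | none => rfl
  | some cs =>
    by_cases hcs : cs = []
    · simp [parse_refresh_ltp_shard_weight_variants,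
        parse_refresh_ltp_shard_weight_variants_alt, hcs]
    · have hpre' : ∀ c ∈ cs, ∀ p ∈ pvSplitComma c,
          PySem.Str.strip p = "" ∨ PySem.Str.strip p ∈ pvAllowed := by
        simpa [Pre_parse_refresh_ltp_shard_weight_variants] using hpre
      have hflat : ∀ v ∈ cs.flatMap
          (fun c => ((pvSplitComma c).map PySem.Str.strip).filter (fun x => x ≠ "")), v ∈ pvAllowed := by
        intro v hv
        obtain ⟨c, hc, hv⟩ := List.mem_flatMap.mp hv
        have hmf := List.mem_filter.mp hv
        obtain ⟨p, hp, rfl⟩ := List.mem_map.mp hmf.1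
        exact (hpre' c hc p hp).resolve_left (by simpa using hmf.2)
      simp only [parse_refresh_ltp_shard_weight_variants,
        parse_refresh_ltp_shard_weight_variants_alt, if_neg hcs, PySem.Set.empty]
      rw [pv_outer cs [] hpre']
      rw [List.filter_eq_nil_iff.mpr (fun v hv => by simpa using hflat v hv)]
      simp [PySem.List.dedup_eq_ofList, PySem.Set.ofList_eq_foldl, PySem.Set.update]
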